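-- pv_equiv track=rewrite | github.com/ai-computing/aicomp | compiler_fx/name_map_test.py | build_fx_to_orig_mapping
-- ===== SOURCE A (Python) =====
-- def normalize_name(name:str) -> str:
--     return name.replace('.', '').replace('_', '')
--
-- def build_fx_to_orig_mapping(pre_param_names, post_param_names):
--     pre_lookup = {
--             normalize_name(name): name
--             for name in pre_param_names
--             }
--
--     fx_to_original = {}
--
--     for post_name in post_param_names:
--         if post_name.startswith("moved_"):
--             simplified_name = post_name[len("moved_"):]
--         else:
--             simplified_name = post_name
--
--         normalized_post = normalize_name(simplified_name)
--         original_name = pre_lookup.get(normalized_post)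
--         if original_name:
--             fx_to_original[post_name] = original_name
--
--
--     return fx_to_original
-- ===== SOURCE B (Python) =====
-- def normalize_name(name: str) -> str:
--     return name.replace('.', '').replace('_', '')
--
-- def build_fx_to_orig_mapping(pre_param_names, post_param_names):
--     fx_to_original = {}
--     for post_name in post_param_names:
--         if post_name.startswith("moved_"):
--             target = normalize_name(post_name[len("moved_"):])
--         else:
--             target = normalize_name(post_name)
--         match = None
--         for name in pre_param_names:
--             if normalize_name(name) == target:
--                 match = name
--         if match:
--             fx_to_original[post_name] = match
--     return fx_to_original
-- ===== Notes on version B (the rewrite author's own statement) =====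
-- stated objective: alternative
-- what changed: Replaces the precomputed normalized-name lookup dict with a per-post-name linear scan of pre_param_names that keeps the last normalized match, so no intermediate dict is built.
import Mathlib
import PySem

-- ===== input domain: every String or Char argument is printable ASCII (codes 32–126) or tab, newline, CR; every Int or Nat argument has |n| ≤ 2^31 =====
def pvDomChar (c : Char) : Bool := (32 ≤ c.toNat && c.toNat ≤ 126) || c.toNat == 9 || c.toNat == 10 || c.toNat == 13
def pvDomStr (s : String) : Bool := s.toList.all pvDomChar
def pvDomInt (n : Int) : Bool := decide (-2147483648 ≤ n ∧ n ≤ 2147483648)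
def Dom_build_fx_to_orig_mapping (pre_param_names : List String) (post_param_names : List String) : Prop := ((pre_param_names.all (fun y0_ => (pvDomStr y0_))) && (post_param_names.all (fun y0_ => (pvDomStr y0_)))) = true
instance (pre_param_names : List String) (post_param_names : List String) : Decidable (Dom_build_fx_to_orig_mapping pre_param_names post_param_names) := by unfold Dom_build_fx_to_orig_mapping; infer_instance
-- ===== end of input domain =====

-- B replaces A's precomputed normalized-name lookup dict with a per-post-name linear scan
-- of pre_param_names keeping the last normalized match (alternative decomposition, same results).

-- ===== PORT A =====
-- name.replace('.', '').replace('_', '')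
def pvNormalizeName (name : String) : String :=
  PySem.Str.replace (PySem.Str.replace name "." "") "_" ""

def build_fx_to_orig_mapping (pre_param_names : List String) (post_param_names : List String) : List (String × String) :=
  let pre_lookup : PySem.Dict String String :=
    pre_param_names.foldl (fun d name => d.insert (pvNormalizeName name) name) PySem.Dict.empty
  let fx_to_original : PySem.Dict String String :=
    post_param_names.foldl (fun d post_name =>
      let simplified_name :=
        if PySem.Str.startswith post_name "moved_" then
          PySem.Str.slice post_name (some 6) none  -- post_name[len("moved_"):]
        else post_name
      let normalized_post := pvNormalizeName simplified_name
      match pre_lookup.get? normalized_post with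
      | some original_name =>
          if original_name ≠ "" then d.insert post_name original_name else d
      | none => d) PySem.Dict.empty
  fx_to_original.items

-- ===== PORT B =====
def build_fx_to_orig_mapping_alt (pre_param_names : List String) (post_param_names : List String) : List (String × String) :=
  (post_param_names.foldl (fun d post_name =>
      let target :=
        if PySem.Str.startswith post_name "moved_" then
          pvNormalizeName (PySem.Str.slice post_name (some 6) none)
        else pvNormalizeName post_name
      let m := pre_param_names.foldl
        (fun acc name => if pvNormalizeName name == target then some name else acc)
        (none : Option String)
      match m with
      | some m' => if m' ≠ "" then d.insert post_name m' else d
      | none => d) (PySem.Dict.empty : PySem.Dict String String)).items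

-- ===== PRECONDITION & SPEC =====
def Spec_build_fx_to_orig_mapping (pre_param_names : List String) (post_param_names : List String) (out : List (String × String)) : Prop := out = build_fx_to_orig_mapping_alt pre_param_names post_param_names
instance (pre_param_names : List String) (post_param_names : List String) (out : List (String × String)) : Decidable (Spec_build_fx_to_orig_mapping pre_param_names post_param_names out) := by unfold Spec_build_fx_to_orig_mapping; infer_instance

-- ===== CLAIM (what is proved, stated in full; the proofs are below) =====
def Claim_equal_build_fx_to_orig_mapping : Prop := ∀ (pre_param_names : List String) (post_param_names : List String), Dom_build_fx_to_orig_mapping pre_param_names post_param_names → Spec_build_fx_to_orig_mapping pre_param_names post_param_names (build_fx_to_orig_mapping pre_param_names post_param_names)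

-- ===== LEMMAS AND PROOFS =====

-- A's dict lookup = B's last-match scan (last insert wins = last match kept)
theorem pvLookup_eq_scan (pre : List String) (k : String) (d0 : PySem.Dict String String) :
    (pre.foldl (fun d name => d.insert (pvNormalizeName name) name) d0).get? k
      = pre.foldl (fun acc name => if pvNormalizeName name == k then some name else acc)
          (d0.get? k) := by
  induction pre generalizing d0 with
  | nil => simp only [List.foldl_nil]
  | cons x xs ih =>
    have hacc : (d0.insert (pvNormalizeName x) x).get? k
        = (if pvNormalizeName x == k then some x else d0.get? k) := by
      rw [PySem.Dict.get?_insert]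
      by_cases h : pvNormalizeName x = k
      · simp [h]
      · simp [h, Ne.symm h]
    simp only [List.foldl_cons, ih, hacc]

-- ===== VERDICT (by name: the statement is the Claim_ definition above) =====
theorem build_fx_to_orig_mapping_spec : Claim_equal_build_fx_to_orig_mapping := by
  intro pre post _
  unfold Spec_build_fx_to_orig_mapping build_fx_to_orig_mapping build_fx_to_orig_mapping_alt
  refine congrArg PySem.Dict.items ?_
  refine PySem.List.foldl_congr_mem _ _ _ _ ?_
  intro d p _
  simp only [pvLookup_eq_scan, PySem.Dict.get?_empty, apply_ite pvNormalizeName]
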